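-- pv_equiv track=rewrite | github.com/seyed0123/classic_AI | AI-Project/AI-Project/401243133.py | center_density
-- ===== SOURCE A (Python) =====
-- from typing import List, Optional, Tuple
--
-- def center_density(board: List[List[Optional[str]]], symbol: str) -> int:
--     N = len(board)
--     center = N // 2
--     score = 0
--     for r in range(N):
--         for c in range(N):
--             if board[r][c] == symbol:
--                 dist = abs(r - center) + abs(c - center)
--                 score += (N - dist)
--     return score
-- ===== SOURCE B (Python) =====
-- from typing import List, Optional
--
-- def center_density(board: List[List[Optional[str]]], symbol: str) -> int:
--     # Separable Manhattan weight: N*count - row-distance mass - column-distance mass.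
--     N = len(board)
--     center = N // 2
--     rowcount = [row[:N].count(symbol) for row in board]
--     colcount = [sum(1 for row in board if row[c] == symbol) for c in range(N)]
--     total = sum(rowcount)
--     rowdist = sum(cnt * abs(r - center) for r, cnt in enumerate(rowcount))
--     coldist = sum(cnt * abs(c - center) for c, cnt in enumerate(colcount))
--     return N * total - rowdist - coldist
-- ===== Notes on version B (the rewrite author's own statement) =====
-- stated objective: alternative
-- what changed: B exploits the separability of the Manhattan weight: it builds per-row and per-column match counts (one count per row via list.count, one 1-D pass per column) and returns N*total - sum(rowcount[r]*|r-center|) - sum(colcount[c]*|c-center|), instead of A's per-cell accumulation of N-dist.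
import Mathlib
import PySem

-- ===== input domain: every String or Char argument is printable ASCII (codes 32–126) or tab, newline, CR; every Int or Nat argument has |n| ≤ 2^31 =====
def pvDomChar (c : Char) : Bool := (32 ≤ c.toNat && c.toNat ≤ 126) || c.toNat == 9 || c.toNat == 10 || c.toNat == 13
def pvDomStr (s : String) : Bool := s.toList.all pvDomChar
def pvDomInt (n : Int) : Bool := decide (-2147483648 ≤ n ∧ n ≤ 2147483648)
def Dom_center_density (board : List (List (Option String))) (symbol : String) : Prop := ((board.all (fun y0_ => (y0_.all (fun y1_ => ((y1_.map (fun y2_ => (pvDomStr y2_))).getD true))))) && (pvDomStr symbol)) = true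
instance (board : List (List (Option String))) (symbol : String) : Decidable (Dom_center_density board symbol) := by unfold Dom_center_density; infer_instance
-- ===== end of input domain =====

-- B replaces A's per-cell accumulation of (N - Manhattan distance) by separable per-row /
-- per-column match counts combined as N*total - rowdist - coldist (objective: alternative decomposition).

-- ===== PORT A =====
def center_density (board : List (List (Option String))) (symbol : String) : Int :=
  let N : Int := board.length
  let center := PySem.Int.floordiv N 2
  (PySem.List.pyRange 0 N 1).foldl (fun score r =>
    (PySem.List.pyRange 0 N 1).foldl (fun score c =>
      if PySem.List.pyGetD (PySem.List.pyGetD board r []) c none = some symbol then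
        score + (N - (|r - center| + |c - center|))
      else score) score) 0

-- ===== PORT B =====
def center_density_alt (board : List (List (Option String))) (symbol : String) : Int :=
  let N : Int := board.length
  let center := PySem.Int.floordiv N 2
  let rowcount : List Int := board.map (fun row =>
    ((PySem.List.count (PySem.List.slice row (some 0) (some N)) (some symbol) : Nat) : Int))
  let colcount : List Int := (PySem.List.pyRange 0 N 1).map (fun c =>
    (board.map (fun row => if PySem.List.pyGetD row c none = some symbol then (1 : Int) else 0)).sum)
  let total := rowcount.sum
  let rowdist := ((PySem.List.enumerate rowcount 0).map (fun p => p.2 * |p.1 - center|)).sum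
  let coldist := ((PySem.List.enumerate colcount 0).map (fun p => p.2 * |p.1 - center|)).sum
  N * total - rowdist - coldist

-- ===== PRECONDITION & SPEC =====
-- A indexes board[r][c] for all r, c < len(board) and raises IndexError iff some row is
-- shorter than the number of rows; Pre_ admits exactly the inputs on which A returns.
def Pre_center_density (board : List (List (Option String))) (symbol : String) : Prop :=
  ∀ row ∈ board, board.length ≤ row.length
instance (board : List (List (Option String))) (symbol : String) : Decidable (Pre_center_density board symbol) := by unfold Pre_center_density; infer_instance

def pvWitness_center_density : List (List (Option String)) × String :=
  ([[some "x", none], [none, some "x"]], "x")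

def Spec_center_density (board : List (List (Option String))) (symbol : String) (out : Int) : Prop := out = center_density_alt board symbol
instance (board : List (List (Option String))) (symbol : String) (out : Int) : Decidable (Spec_center_density board symbol out) := by unfold Spec_center_density; infer_instance

-- ===== CLAIM (what is proved, stated in full; the proofs are below) =====
def Claim_equal_center_density : Prop := ∀ (board : List (List (Option String))) (symbol : String), Dom_center_density board symbol → Pre_center_density board symbol → Spec_center_density board symbol (center_density board symbol)

-- ===== LEMMAS AND PROOFS =====

-- 0/1 indicator of 'cell (·, c) of this row matches symbol'
def cdInd (symbol : String) (row : List (Option String)) (c : Nat) : Int :=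
  if row.getD c none = some symbol then 1 else 0

lemma cd_sum_map_range (n : Nat) (f : Nat → Int) :
    ((List.range n).map f).sum = ∑ i ∈ Finset.range n, f i := Int.neg_inj.mp rfl

lemma cd_map_getD_range {α β : Type} (l : List α) (d : α) (f : α → β) :
    (List.range l.length).map (fun i => f (l.getD i d)) = l.map f := by
  apply List.ext_getElem
  · simp
  · intro i h1 h2
    simp [List.getD_eq_getElem?_getD]
    simp at h1
    simp [List.getElem?_eq_getElem h1]

lemma cd_foldl_ite_add {β : Type} (l : List β) (p : β → Prop) [DecidablePred p]
    (g : β → Int) (a : Int) :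
    l.foldl (fun acc x => if p x then acc + g x else acc) a
      = a + (l.map (fun x => if p x then g x else 0)).sum := by
  have h : (fun (acc : Int) (x : β) => if p x then acc + g x else acc)
      = fun acc x => acc + (if p x then g x else 0) := by
    funext acc x; split_ifs <;> simp
  rw [h, PySem.List.foldl_add]

lemma cd_getD_map {α : Type} (l : List α) (f : α → Int) (k : Nat) (d : α) (hk : k < l.length) :
    (l.map f).getD k 0 = f (l.getD k d) := by
  simp [List.getD_eq_getElem?_getD, hk]

-- list.count over row[:N] is the 1-D sum of indicators
lemma cd_count (symbol : String) (n : Nat) (row : List (Option String)) (h : n ≤ row.length) :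
    ((PySem.List.count (PySem.List.slice row (some 0) (some (n : Int))) (some symbol) : Nat) : Int)
      = ∑ c ∈ Finset.range n, cdInd symbol row c := by
  rw [PySem.List.slice_zero_start, PySem.List.slice_to row (by positivity)]
  rw [PySem.List.count_eq]
  have hlen : (List.take (n : Int).toNat row).length = n := by simp [h]
  have h1 : ((List.take (n : Int).toNat row).map
      (fun o => if (o == some symbol) = true then (1 : Int) else 0)).sum
      = ↑(List.count (some symbol) (List.take (n : Int).toNat row)) := by
    rw [PySem.List.sum_map_ite_one_zero]
    simp [List.count]
  rw [← h1, ← cd_map_getD_range (List.take (n : Int).toNat row) none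
    (fun o => if (o == some symbol) = true then (1 : Int) else 0)]
  rw [hlen, cd_sum_map_range]
  apply Finset.sum_congr rfl
  intro c hc
  simp at hc
  unfold cdInd
  have : (List.take (n : Int).toNat row).getD c none = row.getD c none := by
    simp [List.getD_eq_getElem?_getD, hc]
  rw [this]
  simp

-- the Manhattan-weight sum is separable
lemma cd_algebra (n : Nat) (N cen : Int) (M : Nat → Nat → Int) :
    ∑ r ∈ Finset.range n, ∑ c ∈ Finset.range n, M r c * (N - (|(r : Int) - cen| + |(c : Int) - cen|))
      = N * (∑ r ∈ Finset.range n, ∑ c ∈ Finset.range n, M r c)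
        - ∑ r ∈ Finset.range n, (∑ c ∈ Finset.range n, M r c) * |(r : Int) - cen|
        - ∑ c ∈ Finset.range n, (∑ r ∈ Finset.range n, M r c) * |(c : Int) - cen| := by
  have h3 : ∑ r ∈ Finset.range n, ∑ c ∈ Finset.range n, M r c * |(c : Int) - cen|
      = ∑ c ∈ Finset.range n, (∑ r ∈ Finset.range n, M r c) * |(c : Int) - cen| := by
    rw [Finset.sum_comm]
    simp [Finset.sum_mul]
  calc ∑ r ∈ Finset.range n, ∑ c ∈ Finset.range n, M r c * (N - (|(r : Int) - cen| + |(c : Int) - cen|))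
      = ∑ r ∈ Finset.range n, ∑ c ∈ Finset.range n,
          (M r c * N - M r c * |(r : Int) - cen| - M r c * |(c : Int) - cen|) := by
        apply Finset.sum_congr rfl; intro r _; apply Finset.sum_congr rfl; intro c _; ring
    _ = _ := by
        simp only [Finset.sum_sub_distrib]
        rw [h3]
        congr 1
        congr 1
        · rw [Finset.mul_sum]
          apply Finset.sum_congr rfl; intro r _
          rw [Finset.mul_sum]
          apply Finset.sum_congr rfl; intro c _; ring
        · apply Finset.sum_congr rfl; intro r _
          rw [Finset.sum_mul]

-- A is the double sum of indicator-weighted terms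
lemma cd_A_eq (board : List (List (Option String))) (symbol : String) :
    center_density board symbol
      = ∑ r ∈ Finset.range board.length, ∑ c ∈ Finset.range board.length,
          cdInd symbol (board.getD r []) c
            * ((board.length : Int) - (|(r : Int) - PySem.Int.floordiv board.length 2|
                + |(c : Int) - PySem.Int.floordiv board.length 2|)) := by
  simp only [center_density, PySem.List.pyRange_zero_natCast, List.foldl_map,
    cd_foldl_ite_add, PySem.List.foldl_add, zero_add,
    PySem.List.pyGetD_natCast, cd_sum_map_range]
  apply Finset.sum_congr rfl; intro r _
  apply Finset.sum_congr rfl; intro c _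
  unfold cdInd; split_ifs <;> simp

-- B is N*total - rowdist - coldist over the same indicators
lemma cd_B_eq (board : List (List (Option String))) (symbol : String)
    (hpre : ∀ row ∈ board, board.length ≤ row.length) :
    center_density_alt board symbol
      = (board.length : Int) * (∑ r ∈ Finset.range board.length, ∑ c ∈ Finset.range board.length, cdInd symbol (board.getD r []) c)
        - ∑ r ∈ Finset.range board.length, (∑ c ∈ Finset.range board.length, cdInd symbol (board.getD r []) c) * |(r : Int) - PySem.Int.floordiv board.length 2|
        - ∑ c ∈ Finset.range board.length, (∑ r ∈ Finset.range board.length, cdInd symbol (board.getD r []) c) * |(c : Int) - PySem.Int.floordiv board.length 2| := by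
  have hmem : ∀ r : Nat, r < board.length → board.length ≤ (board.getD r []).length := by
    intro r hr
    exact hpre _ (by rw [List.getD_eq_getElem?_getD, List.getElem?_eq_getElem hr]; exact List.getElem_mem hr)
  simp only [center_density_alt, PySem.List.enumerate_eq_map_pyRange _ (0 : Int)]
  simp only [PySem.List.len, List.length_map, PySem.List.length_pyRange_one,
    Int.sub_zero, Int.toNat_natCast]
  simp only [PySem.List.pyRange_zero_natCast, List.map_map, cd_sum_map_range, Function.comp_def]
  simp only [PySem.List.pyGetD_natCast]
  congr 1
  congr 1
  · rw [← cd_map_getD_range board []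
      (fun row => ((PySem.List.count (PySem.List.slice row (some 0) (some (board.length : Int))) (some symbol) : Nat) : Int)),
      cd_sum_map_range]
    congr 1
    apply Finset.sum_congr rfl
    intro r hr
    simp only [Finset.mem_range] at hr
    exact cd_count symbol board.length (board.getD r []) (hmem r hr)
  · apply Finset.sum_congr rfl
    intro r hr
    simp only [Finset.mem_range] at hr
    rw [cd_getD_map board _ r [] hr]
    rw [cd_count symbol board.length (board.getD r []) (hmem r hr)]
  · apply Finset.sum_congr rfl
    intro c hc
    simp only [Finset.mem_range] at hc
    rw [cd_getD_map (List.range board.length) _ c 0 (by simp [hc])]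
    have hgr : (List.range board.length).getD c 0 = c := by
      rw [List.getD_eq_getElem?_getD, List.getElem?_range hc]
      rfl
    rw [hgr]
    rw [← cd_map_getD_range board []
      (fun row => if row.getD (c : Nat) none = some symbol then (1 : Int) else 0),
      cd_sum_map_range]
    rfl

-- ===== VERDICT (by name: the statement is the Claim_ definition above) =====
theorem center_density_spec : Claim_equal_center_density := by
  intro board symbol _ hpre
  unfold Spec_center_density
  rw [cd_A_eq, cd_B_eq board symbol hpre, cd_algebra]
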